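-- pv_equiv track=rewrite | github.com/duzda/aoc2024 | 2/second.py | is_limited
-- ===== SOURCE A (Python) =====
-- def _is_limited(numbers: list[int], low_limit: int, high_limit: int) -> bool:
--     for i in range(len(numbers) - 1):
--         diff = numbers[i] - numbers[i + 1]
--         if not (diff >= low_limit and diff <= high_limit):
--             return False
--
--     return True
--
-- def is_limited(numbers: list[int], low_limit: int, high_limit: int) -> bool:
--     if _is_limited(numbers, low_limit, high_limit):
--         return True
--
--     for i in range(len(numbers)):
--         if _is_limited(
--             [*numbers[:i], *numbers[i + 1 :]],
--             low_limit,
--             high_limit,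
--         ):
--             return True
--
--     return False
-- ===== SOURCE B (Python) =====
-- def is_limited(numbers: list[int], low_limit: int, high_limit: int) -> bool:
--     n = len(numbers)
--
--     def ok(a, b):
--         return low_limit <= a - b <= high_limit
--
--     # first index whose adjacent difference is out of bounds, if any
--     bad = next((k for k in range(n - 1) if not ok(numbers[k], numbers[k + 1])), None)
--     if bad is None:
--         return True
--
--     def valid(seq):
--         return all(ok(seq[k], seq[k + 1]) for k in range(len(seq) - 1))
--
--     # removing any element other than bad or bad+1 leaves the bad pair adjacent,
--     # so only these two removals can possibly help
--     return valid(numbers[:bad] + numbers[bad + 1:]) or valid(numbers[:bad + 1] + numbers[bad + 2:])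
-- ===== Notes on version B (the rewrite author's own statement) =====
-- stated objective: faster
-- what changed: Instead of retrying the full validity scan for every possible removal, B finds the first out-of-bounds adjacent pair and checks only the two removals (of its left or right element) that can possibly repair the sequence.
import Mathlib
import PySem

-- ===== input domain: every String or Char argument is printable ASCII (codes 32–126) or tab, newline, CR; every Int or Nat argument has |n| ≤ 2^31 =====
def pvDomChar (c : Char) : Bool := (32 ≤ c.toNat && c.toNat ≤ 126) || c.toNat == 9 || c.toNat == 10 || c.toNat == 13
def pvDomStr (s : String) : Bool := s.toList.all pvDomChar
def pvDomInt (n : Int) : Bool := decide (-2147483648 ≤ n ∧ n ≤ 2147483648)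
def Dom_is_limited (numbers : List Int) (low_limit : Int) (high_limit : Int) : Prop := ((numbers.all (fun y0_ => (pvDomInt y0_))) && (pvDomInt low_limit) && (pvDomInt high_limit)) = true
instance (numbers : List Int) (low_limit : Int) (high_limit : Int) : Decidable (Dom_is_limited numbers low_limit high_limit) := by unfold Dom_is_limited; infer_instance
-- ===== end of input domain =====

-- B replaces A's try-every-removal quadratic scan by locating the first out-of-bounds
-- adjacent pair and checking only the two removals that can repair it (faster, asymptotic).


-- ===== PORT A =====
-- Python's early-return-False scan over range(len-1) is the List.all of the body.
def _is_limited (numbers : List Int) (low_limit : Int) (high_limit : Int) : Bool :=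
  (PySem.List.pyRange 0 ((numbers.length : Int) - 1) 1).all (fun i =>
    let diff := PySem.List.pyGetD numbers i 0 - PySem.List.pyGetD numbers (i + 1) 0
    decide (diff ≥ low_limit ∧ diff ≤ high_limit))

def is_limited (numbers : List Int) (low_limit : Int) (high_limit : Int) : Bool :=
  if _is_limited numbers low_limit high_limit then true
  else
    (PySem.List.pyRange 0 (numbers.length : Int) 1).any (fun i =>
      _is_limited
        (PySem.List.slice numbers none (some i) ++ PySem.List.slice numbers (some (i + 1)) none)
        low_limit high_limit)

-- ===== PORT B =====
def okDiff (low_limit high_limit a b : Int) : Bool :=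
  decide (low_limit ≤ a - b ∧ a - b ≤ high_limit)

def validSeq (low_limit high_limit : Int) (seq : List Int) : Bool :=
  (PySem.List.pyRange 0 ((seq.length : Int) - 1) 1).all (fun k =>
    okDiff low_limit high_limit (PySem.List.pyGetD seq k 0) (PySem.List.pyGetD seq (k + 1) 0))

-- first bad adjacent pair via next(...) = find?; then only the two relevant removals
def is_limited_alt (numbers : List Int) (low_limit : Int) (high_limit : Int) : Bool :=
  match (PySem.List.pyRange 0 ((numbers.length : Int) - 1) 1).find? (fun k =>
      ! okDiff low_limit high_limit
          (PySem.List.pyGetD numbers k 0) (PySem.List.pyGetD numbers (k + 1) 0)) with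
  | none => true
  | some bad =>
      validSeq low_limit high_limit
        (PySem.List.slice numbers none (some bad) ++
         PySem.List.slice numbers (some (bad + 1)) none)
      || validSeq low_limit high_limit
        (PySem.List.slice numbers none (some (bad + 1)) ++
         PySem.List.slice numbers (some (bad + 2)) none)

-- ===== PRECONDITION & SPEC =====
def Spec_is_limited (numbers : List Int) (low_limit : Int) (high_limit : Int) (out : Bool) : Prop := out = is_limited_alt numbers low_limit high_limit
instance (numbers : List Int) (low_limit : Int) (high_limit : Int) (out : Bool) : Decidable (Spec_is_limited numbers low_limit high_limit out) := by unfold Spec_is_limited; infer_instance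

-- ===== CLAIM (what is proved, stated in full; the proofs are below) =====
def Claim_equal_is_limited : Prop := ∀ (numbers : List Int) (low_limit : Int) (high_limit : Int), Dom_is_limited numbers low_limit high_limit → Spec_is_limited numbers low_limit high_limit (is_limited numbers low_limit high_limit)

-- ===== LEMMAS AND PROOFS =====

/-- Adjacent-pair validity, structurally. -/
def chainP (p : Int → Int → Bool) : List Int → Bool
  | a :: b :: t => p a b && chainP p (b :: t)
  | _ => true

theorem rangeAll_eq_chainP (p : Int → Int → Bool) (l : List Int) :
    (List.range (l.length - 1)).all (fun k => p (l.getD k 0) (l.getD (k + 1) 0)) = chainP p l := by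
  induction l with
  | nil => rfl
  | cons a l ih =>
    cases l with
    | nil => rfl
    | cons b t =>
      have : (a :: b :: t).length - 1 = (b :: t).length - 1 + 1 := by
        simp
      rw [this, List.range_succ_eq_map]
      simp only [List.all_cons, List.all_map, chainP, List.getD_cons_zero, List.getD_cons_succ]
      rw [← ih]
      rfl

theorem chainP_iff (p : Int → Int → Bool) (l : List Int) :
    chainP p l = true ↔ ∀ (k : Nat) (h : k + 1 < l.length), p l[k] l[k + 1] = true := by
  induction l with
  | nil => simp [chainP]
  | cons a l ih =>
    cases l with
    | nil =>
      simp [chainP]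
    | cons b t =>
      simp only [chainP, Bool.and_eq_true, ih]
      constructor
      · rintro ⟨hab, htail⟩ k hk
        cases k with
        | zero => simpa using hab
        | succ k =>
          have := htail k (by simpa using hk)
          simpa using this
      · intro h
        refine ⟨by simpa using h 0 (by simp), fun k hk => ?_⟩
        have := h (k + 1) (by simpa using hk)
        simpa using this

/-- The pyRange/pyGetD scan both ports run is chainP. -/
theorem scanAll_eq_chainP (p : Int → Int → Bool) (l : List Int) :
    ((PySem.List.pyRange 0 ((l.length : Int) - 1) 1).all (fun i =>
      p (PySem.List.pyGetD l i 0) (PySem.List.pyGetD l (i + 1) 0))) = chainP p l := by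
  rw [PySem.List.pyRange_one]
  have hlen : ((l.length : Int) - 1 - 0).toNat = l.length - 1 := by omega
  rw [hlen, List.all_map, ← rangeAll_eq_chainP p l]
  refine List.all_congr rfl (fun k => ?_)
  simp only [Function.comp_apply, Int.zero_add]
  have h1 : PySem.List.pyGetD l (k : Int) 0 = l.getD k 0 := PySem.List.pyGetD_natCast l k 0
  have h2 : PySem.List.pyGetD l ((k : Int) + 1) 0 = l.getD (k + 1) 0 := by
    have : ((k : Int) + 1) = ((k + 1 : Nat) : Int) := by push_cast; ring
    rw [this, PySem.List.pyGetD_natCast]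
  rw [h1, h2]

/-- The two Python slices glued together are eraseIdx. -/
theorem slice_append_eq_eraseIdx (l : List Int) (i : Int) (hi : 0 ≤ i) :
    PySem.List.slice l none (some i) ++ PySem.List.slice l (some (i + 1)) none =
      l.eraseIdx i.toNat := by
  rw [PySem.List.slice_to l hi, PySem.List.slice_from l (by omega : (0:Int) ≤ i + 1)]
  have : (i + 1).toNat = i.toNat + 1 := by omega
  rw [this, List.eraseIdx_eq_take_drop_succ]

/-- Removing an element away from a bad adjacent pair leaves the pair adjacent. -/
theorem chainP_eraseIdx_false (p : Int → Int → Bool) (l : List Int) (B j : Nat)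
    (hB : B + 1 < l.length) (hj : j < l.length) (hjB : j ≠ B) (hjB1 : j ≠ B + 1)
    (hp : p l[B] l[B + 1] = false) : chainP p (l.eraseIdx j) = false := by
  by_contra h
  have h' : chainP p (l.eraseIdx j) = true := by
    cases hc : chainP p (l.eraseIdx j) with
    | false => exact absurd hc h
    | true => rfl
  have hiff := (chainP_iff p (l.eraseIdx j)).mp h'
  have hlen : (l.eraseIdx j).length = l.length - 1 := by
    rw [List.length_eraseIdx]; simp [hj]
  rcases Nat.lt_or_ge j B with hlt | hge
  · -- j < B : the pair sits at positions B-1, B of the erased list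
    have hk : (B - 1) + 1 < (l.eraseIdx j).length := by omega
    have := hiff (B - 1) hk
    have e1 : (l.eraseIdx j)[B - 1]'(by omega) = l[B] := by
      rw [List.getElem_eraseIdx_of_ge (by omega) (by omega)]
      congr 1; omega
    have e2 : (l.eraseIdx j)[(B - 1) + 1]'(by omega) = l[B + 1] := by
      rw [List.getElem_eraseIdx_of_ge (by omega) (by omega)]
      congr 1; omega
    rw [e1, e2] at this
    rw [this] at hp; simp at hp
  · -- j ≥ B, j ≠ B, j ≠ B+1 ⇒ j > B+1 : the pair sits at positions B, B+1
    have hgt : B + 1 < j := by omega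
    have hk : B + 1 < (l.eraseIdx j).length := by omega
    have := hiff B hk
    have e1 : (l.eraseIdx j)[B]'(by omega) = l[B] :=
      List.getElem_eraseIdx_of_lt (by omega) (by omega)
    have e2 : (l.eraseIdx j)[B + 1]'(by omega) = l[B + 1] :=
      List.getElem_eraseIdx_of_lt (by omega) (by omega)
    rw [e1, e2] at this
    rw [this] at hp; simp at hp

/-- A's inner scan is B's chainP with okDiff (diff ≥ low unfolds to low ≤ diff). -/
theorem _is_limited_eq_chainP (l : List Int) (low high : Int) :
    _is_limited l low high = chainP (okDiff low high) l := by
  unfold _is_limited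
  rw [← scanAll_eq_chainP (okDiff low high) l]
  rfl

theorem validSeq_eq_chainP (l : List Int) (low high : Int) :
    validSeq low high l = chainP (okDiff low high) l := by
  unfold validSeq
  exact scanAll_eq_chainP (okDiff low high) l

-- ===== VERDICT (by name: the statement is the Claim_ definition above) =====
theorem is_limited_spec : Claim_equal_is_limited := by
  unfold Claim_equal_is_limited
  intro l low high _
  unfold Spec_is_limited
  set p := okDiff low high with hp
  unfold is_limited is_limited_alt
  cases hf : (PySem.List.pyRange 0 ((l.length : Int) - 1) 1).find? (fun k =>
      ! p (PySem.List.pyGetD l k 0) (PySem.List.pyGetD l (k + 1) 0)) with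
  | none =>
    -- no bad pair: the whole list is valid, both sides return true
    have hall : chainP p l = true := by
      rw [← scanAll_eq_chainP p l]
      rw [List.all_eq_true]
      intro i hi
      have := (List.find?_eq_none.mp hf) i hi
      simpa using this
    have : _is_limited l low high = true := by rw [_is_limited_eq_chainP]; exact hall
    simp [this]
  | some bad =>
    have hmem := List.mem_of_find?_eq_some hf
    have hbad := List.find?_some hf
    have hrange := PySem.List.mem_pyRange_one.mp hmem
    have h0 : (0:Int) ≤ bad := hrange.1
    have h1 : bad < (l.length : Int) - 1 := hrange.2
    set B := bad.toNat with hBdef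
    have hBcast : (B : Int) = bad := by omega
    have hB1 : B + 1 < l.length := by omega
    have hokfalse : p l[B] l[B + 1] = false := by
      have e1 : PySem.List.pyGetD l bad 0 = l[B] :=
        PySem.List.pyGetD_eq_getElem l 0 h0 (by omega)
      have e2 : PySem.List.pyGetD l (bad + 1) 0 = l[B + 1] := by
        have : (bad + 1).toNat = B + 1 := by omega
        rw [PySem.List.pyGetD_eq_getElem l 0 (by omega) (by omega)]
        simp only [this]
      rw [e1, e2] at hbad
      simpa using hbad
    -- the whole list is not valid
    have hnall : _is_limited l low high = false := by
      rw [_is_limited_eq_chainP]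
      by_contra h
      have h' : chainP p l = true := by
        cases hc : chainP p l with
        | false => exact absurd hc h
        | true => rfl
      have := (chainP_iff p l).mp h' B hB1
      rw [this] at hokfalse; simp at hokfalse
    rw [hnall]
    simp only [Bool.false_eq_true, if_false]
    -- rewrite both B-side removals as eraseIdx
    have eB : PySem.List.slice l none (some bad) ++ PySem.List.slice l (some (bad + 1)) none
        = l.eraseIdx B := slice_append_eq_eraseIdx l bad h0
    have eB1 : PySem.List.slice l none (some (bad + 1)) ++ PySem.List.slice l (some (bad + 1 + 1)) none
        = l.eraseIdx (B + 1) := by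
      have := slice_append_eq_eraseIdx l (bad + 1) (by omega)
      have ht : (bad + 1).toNat = B + 1 := by omega
      rw [ht] at this
      exact this
    have hstep : (bad + 2 : Int) = bad + 1 + 1 := by ring
    rw [hstep, eB, eB1, validSeq_eq_chainP, validSeq_eq_chainP]
    -- now: any over all removals = chainP (erase B) || chainP (erase B+1)
    rcases hr : (chainP p (l.eraseIdx B) || chainP p (l.eraseIdx (B + 1))) with _ | _
    · -- both candidate removals fail: every removal fails
      rw [Bool.or_eq_false_iff] at hr
      rw [List.any_eq_false]
      intro i hi
      have hirange := PySem.List.mem_pyRange_one.mp hi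
      have hi0 : (0:Int) ≤ i := hirange.1
      have hin : i.toNat < l.length := by omega
      rw [_is_limited_eq_chainP, slice_append_eq_eraseIdx l i hi0]
      by_cases hiB : i.toNat = B
      · rw [hiB, hr.1]; simp
      · by_cases hiB1 : i.toNat = B + 1
        · rw [hiB1, hr.2]; simp
        · rw [chainP_eraseIdx_false p l B i.toNat hB1 hin hiB hiB1 hokfalse]; simp
    · -- one of the two candidate removals succeeds: exhibit it in A's loop
      rw [List.any_eq_true]
      rw [Bool.or_eq_true_iff] at hr
      rcases hr with hr | hr
      · refine ⟨bad, ?_, ?_⟩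
        · exact PySem.List.mem_pyRange_one.mpr ⟨h0, by omega⟩
        · rw [_is_limited_eq_chainP, slice_append_eq_eraseIdx l bad h0, hr]
      · refine ⟨bad + 1, ?_, ?_⟩
        · exact PySem.List.mem_pyRange_one.mpr ⟨by omega, by omega⟩
        · rw [_is_limited_eq_chainP, slice_append_eq_eraseIdx l (bad + 1) (by omega)]
          have ht : (bad + 1).toNat = B + 1 := by omega
          rw [ht, hr]
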